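-- pv_equiv track=rewrite | github.com/markus-ap/adventskode | 2022/20221207.py | filtrer_mappar2
-- ===== SOURCE A (Python) =====
-- def filtrer_mappar2(ob: dict, mål):
--     svar = []
--     for mappe, storleik in ob.items():
--         total = 0
--         for m2, s2 in ob.items():
--             if m2.startswith(mappe):
--                 total += ob[m2]
--         if total >= mål:
--             svar.append(total)
--     return sorted(svar, reverse=True)
-- ===== SOURCE B (Python) =====
-- def filtrer_mappar2(ob: dict, mål):
--     # One pass over the items: each size is credited to every prefix of its
--     # key that is itself a key, instead of re-scanning all items per key.
--     totals = {k: 0 for k in ob}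
--     for m2, s2 in ob.items():
--         for i in range(len(m2) + 1):
--             p = m2[:i]
--             if p in totals:
--                 totals[p] += s2
--     return sorted((t for t in totals.values() if t >= mål), reverse=True)
-- ===== Notes on version B (the rewrite author's own statement) =====
-- stated objective: faster
-- what changed: Instead of re-scanning the whole dict for every folder (all-pairs startswith checks), B makes one pass over the items and credits each size to every prefix of its key that is itself a key, accumulating totals in a dict.
import Mathlib
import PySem

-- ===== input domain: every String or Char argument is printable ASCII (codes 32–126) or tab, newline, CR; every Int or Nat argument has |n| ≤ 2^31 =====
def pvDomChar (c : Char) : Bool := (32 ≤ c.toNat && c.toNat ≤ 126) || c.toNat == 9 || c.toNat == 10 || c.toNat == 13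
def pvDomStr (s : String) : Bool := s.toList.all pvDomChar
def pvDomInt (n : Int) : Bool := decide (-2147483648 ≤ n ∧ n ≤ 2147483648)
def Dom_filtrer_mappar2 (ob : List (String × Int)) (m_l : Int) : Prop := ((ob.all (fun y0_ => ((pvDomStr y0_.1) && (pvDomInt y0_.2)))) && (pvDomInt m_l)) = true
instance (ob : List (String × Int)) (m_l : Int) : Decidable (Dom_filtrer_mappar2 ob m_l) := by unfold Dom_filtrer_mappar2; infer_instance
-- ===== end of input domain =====

-- B replaces A's quadratic all-pairs prefix scan by one pass that credits each
-- item's size to every prefix of its key that is itself a key (objective: faster).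


-- ===== PORT A =====
-- 'ob[m2]' is ported as 'd.getD q.1 0': the key q.1 is drawn from d.items, so it
-- is always present and Python's KeyError is unreachable (the default is dead).
def filtrer_mappar2 (ob : List (String × Int)) (m_l : Int) : List Int :=
  let d := PySem.Dict.ofList ob
  let svar := d.items.foldl (fun svar p =>
    let total := d.items.foldl (fun total q =>
      if PySem.Str.startswith q.1 p.1 then total + d.getD q.1 0 else total) 0
    if m_l ≤ total then svar ++ [total] else svar) ([] : List Int)
  PySem.List.sorted svar (fun x => x) true

-- ===== PORT B =====
def filtrer_mappar2_alt (ob : List (String × Int)) (m_l : Int) : List Int :=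
  let d := PySem.Dict.ofList ob
  let totals0 := d.keys.foldl (fun t k => t.insert k (0 : Int)) PySem.Dict.empty
  let totals := d.items.foldl (fun t q =>
    (PySem.List.pyRange 0 (PySem.Str.len q.1 + 1)).foldl (fun t i =>
      let p := PySem.Str.slice q.1 none (some i)
      if t.contains p then t.modify p 0 (· + q.2) else t) t) totals0
  PySem.List.sorted (totals.values.filter (fun t => decide (m_l ≤ t))) (fun x => x) true

-- ===== PRECONDITION & SPEC =====
def Spec_filtrer_mappar2 (ob : List (String × Int)) (m_l : Int) (out : List Int) : Prop := out = filtrer_mappar2_alt ob m_l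
instance (ob : List (String × Int)) (m_l : Int) (out : List Int) : Decidable (Spec_filtrer_mappar2 ob m_l out) := by unfold Spec_filtrer_mappar2; infer_instance

-- ===== CLAIM (what is proved, stated in full; the proofs are below) =====
def Claim_equal_filtrer_mappar2 : Prop := ∀ (ob : List (String × Int)) (m_l : Int), Dom_filtrer_mappar2 ob m_l → Spec_filtrer_mappar2 ob m_l (filtrer_mappar2 ob m_l)

-- ===== LEMMAS AND PROOFS =====

-- the guarded-accumulation loop of A's inner pass, as filter/map/sum
theorem foldl_if_add {α : Type} (l : List α) (p : α → Prop) [DecidablePred p] (f : α → Int) (a : Int) :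
    l.foldl (fun acc x => if p x then acc + f x else acc) a
      = a + ((l.filter (fun x => decide (p x))).map f).sum := by
  induction l generalizing a with
  | nil => simp
  | cons x xs ih =>
    by_cases h : p x <;> simp [h, ih, add_assoc]

-- B's inner loop (guarded modify over a list of candidate keys) never changes the key list
theorem innerKeys (ps : List String) (t : PySem.Dict String Int) (v : Int) :
    (ps.foldl (fun t p => if t.contains p then t.modify p 0 (· + v) else t) t).keys = t.keys := by
  induction ps generalizing t with
  | nil => rfl
  | cons p ps ih =>
    simp only [List.foldl_cons]
    by_cases h : t.contains p = true
    · rw [ih]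
      simp [h, PySem.Dict.keys_modify, PySem.Dict.keys_insert_of_contains t _ h]
    · simp only [Bool.not_eq_true] at h
      simp [h, ih]

theorem innerContains (ps : List String) (t : PySem.Dict String Int) (v : Int) (x : String) :
    (ps.foldl (fun t p => if t.contains p then t.modify p 0 (· + v) else t) t).contains x = t.contains x := by
  induction ps generalizing t with
  | nil => rfl
  | cons p ps ih =>
    simp only [List.foldl_cons]
    by_cases hp : t.contains p = true
    · rw [if_pos hp, ih]
      by_cases hx : x = p
      · subst hx; simp [PySem.Dict.contains_modify, hp]
      · simp [PySem.Dict.contains_modify, hx]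
    · rw [if_neg hp, ih]

-- B's inner loop adds v to slot x once per occurrence of x among the candidates
theorem innerGetD (ps : List String) (t : PySem.Dict String Int) (v : Int) (x : String) :
    (ps.foldl (fun t p => if t.contains p then t.modify p 0 (· + v) else t) t).getD x 0
      = t.getD x 0 + (if t.contains x then (ps.count x : Int) * v else 0) := by
  induction ps generalizing t with
  | nil => simp
  | cons p ps ih =>
    simp only [List.foldl_cons, List.count_cons]
    by_cases hp : t.contains p = true
    · rw [if_pos hp, ih]
      have hc : (t.modify p 0 (· + v)).contains x = t.contains x := by
        by_cases hx : x = p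
        · subst hx; simp [PySem.Dict.contains_modify, hp]
        · simp [PySem.Dict.contains_modify, hx]
      rw [hc, PySem.Dict.getD_modify]
      by_cases hx : x = p
      · subst hx
        simp only [if_pos hp, beq_self_eq_true, if_pos]
        push_cast
        ring
      · have hpx : ¬ p = x := fun h => hx h.symm
        simp [hx, hpx]
    · rw [if_neg hp, ih]
      by_cases hx : x = p
      · subst hx
        simp [hp]
      · have hpx : ¬ p = x := fun h => hx h.symm
        simp [hpx]

-- the list of all prefixes of s contains k once if k is a prefix of s, else not at all
theorem count_slices (s k : String) :
    ((List.range (s.toList.length + 1)).map (fun j => PySem.Str.slice s none (some (j : Nat)))).count k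
      = if PySem.Str.startswith s k then 1 else 0 := by
  have htl : ∀ j : Nat, (PySem.Str.slice s none (some (j : Nat))).toList = s.toList.take j := by
    intro j
    rw [PySem.Str.toList_slice, PySem.Chars.slice_eq_listSlice, PySem.List.slice_to_natCast]
  by_cases h : PySem.Str.startswith s k = true
  · -- k is a prefix of s: it occurs exactly once, at j = k.toList.length
    have hpre : k.toList <+: s.toList := by
      rw [PySem.Str.startswith_eq] at h
      exact (PySem.Chars.startswith_iff _ _).mp h
    have hlen : k.toList.length ≤ s.toList.length := hpre.length_le
    have hmem : k ∈ (List.range (s.toList.length + 1)).map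
        (fun j => PySem.Str.slice s none (some (j : Nat))) := by
      refine List.mem_map.mpr ⟨k.toList.length, List.mem_range.mpr (by omega), ?_⟩
      apply String.toList_inj.mp
      rw [htl]
      exact (List.prefix_iff_eq_take.mp hpre).symm
    have hnd : ((List.range (s.toList.length + 1)).map
        (fun j => PySem.Str.slice s none (some (j : Nat)))).Nodup := by
      refine List.Nodup.map_on ?_ List.nodup_range
      intro x hx y hy hxy
      have hx' := List.mem_range.mp hx
      have hy' := List.mem_range.mp hy
      have h2 := congrArg String.toList hxy
      rw [htl, htl] at h2
      have h3 : min x s.toList.length = min y s.toList.length := by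
        simpa [List.length_take] using congrArg List.length h2
      omega
    rw [if_pos h]
    exact List.count_eq_one_of_mem hnd hmem
  · -- k is not a prefix of s: it never occurs among the prefixes
    rw [if_neg h, List.count_eq_zero]
    intro hmem
    obtain ⟨j, _, hjs⟩ := List.mem_map.mp hmem
    apply h
    rw [PySem.Str.startswith_eq]
    refine (PySem.Chars.startswith_iff _ _).mpr ?_
    have h2 := (congrArg String.toList hjs).symm
    rw [htl] at h2
    rw [h2]
    exact List.take_prefix j _

-- B's per-item loop over pyRange(len+1) is the fold over the prefix list
theorem innerRange (q : String × Int) (t : PySem.Dict String Int) :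
    (PySem.List.pyRange 0 (PySem.Str.len q.1 + 1)).foldl (fun t i =>
        if t.contains (PySem.Str.slice q.1 none (some i)) then
          t.modify (PySem.Str.slice q.1 none (some i)) 0 (· + q.2) else t) t
      = ((List.range (q.1.toList.length + 1)).map
          (fun j => PySem.Str.slice q.1 none (some (j : Nat)))).foldl
          (fun t p => if t.contains p then t.modify p 0 (· + q.2) else t) t := by
  have h1 : PySem.Str.len q.1 + 1 = ((q.1.toList.length + 1 : Nat) : Int) := by
    rw [PySem.Str.len_eq]; push_cast; ring
  rw [h1, PySem.List.pyRange_zero_natCast, List.foldl_map, List.foldl_map]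

-- B's outer loop: totals[x] accumulates the sizes of the items whose key x prefixes
theorem outerGetD (l : List (String × Int)) (t : PySem.Dict String Int) (x : String) :
    (l.foldl (fun t q =>
        (PySem.List.pyRange 0 (PySem.Str.len q.1 + 1)).foldl (fun t i =>
          let p := PySem.Str.slice q.1 none (some i)
          if t.contains p then t.modify p 0 (· + q.2) else t) t) t).getD x 0
      = t.getD x 0 + (if t.contains x then
          ((l.filter (fun q => PySem.Str.startswith q.1 x)).map (·.2)).sum else 0) := by
  induction l generalizing t with
  | nil => simp
  | cons q l ih =>
    simp only [List.foldl_cons]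
    rw [ih, innerRange, innerContains, innerGetD, count_slices]
    by_cases hc : t.contains x = true
    · rw [if_pos hc, if_pos hc, if_pos hc, List.filter_cons]
      by_cases hs : PySem.Str.startswith q.1 x = true
      · rw [if_pos hs, if_pos hs]
        simp only [List.map_cons, List.sum_cons]
        ring
      · rw [if_neg hs, if_neg hs]
        ring
    · simp [hc]

theorem outerKeys (l : List (String × Int)) (t : PySem.Dict String Int) :
    (l.foldl (fun t q =>
        (PySem.List.pyRange 0 (PySem.Str.len q.1 + 1)).foldl (fun t i =>
          let p := PySem.Str.slice q.1 none (some i)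
          if t.contains p then t.modify p 0 (· + q.2) else t) t) t).keys = t.keys := by
  induction l generalizing t with
  | nil => rfl
  | cons q l ih =>
    simp only [List.foldl_cons]
    rw [ih, innerRange, innerKeys]

-- the two ports agree on every input
theorem ports_agree (ob : List (String × Int)) (m_l : Int) :
    filtrer_mappar2 ob m_l = filtrer_mappar2_alt ob m_l := by
  unfold filtrer_mappar2 filtrer_mappar2_alt
  have hnd : (PySem.Dict.ofList ob).keys.Nodup := PySem.Dict.nodup_keys_ofList ob
  set d := PySem.Dict.ofList ob with hd
  set T : String → Int := fun k =>
    ((d.items.filter (fun q => PySem.Str.startswith q.1 k)).map (·.2)).sum with hT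
  -- A's inner loop computes T
  have htot : ∀ k : String,
      d.items.foldl (fun total q =>
        if PySem.Str.startswith q.1 k then total + d.getD q.1 0 else total) 0 = T k := by
    intro k
    rw [PySem.List.foldl_congr_mem d.items _
      (fun total q => if PySem.Str.startswith q.1 k then total + q.2 else total) 0 ?_]
    · rw [foldl_if_add d.items (fun q => PySem.Str.startswith q.1 k = true) (·.2) 0]
      simp [hT]
    · intro acc x hx
      rw [PySem.Dict.getD_of_mem_items d (show (x.1, x.2) ∈ d.items by simpa using hx) hnd 0]
  -- A's outer loop: filter + map over the items
  have hsvar : d.items.foldl (fun svar p =>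
      let total := d.items.foldl (fun total q =>
        if PySem.Str.startswith q.1 p.1 then total + d.getD q.1 0 else total) 0
      if m_l ≤ total then svar ++ [total] else svar) ([] : List Int)
      = (d.items.filter (fun p => decide (m_l ≤ T p.1))).map (fun p => T p.1) := by
    have hfun : (fun (svar : List Int) (p : String × Int) =>
        let total := d.items.foldl (fun total q =>
          if PySem.Str.startswith q.1 p.1 then total + d.getD q.1 0 else total) 0
        if m_l ≤ total then svar ++ [total] else svar)
        = (fun svar p => if (fun p => decide (m_l ≤ T p.1)) p = true
            then svar ++ [(fun (p : String × Int) => T p.1) p] else svar) := by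
      funext svar p
      simp only [htot, decide_eq_true_eq]
    rw [hfun, PySem.List.foldl_append_if]
    simp
  -- B's seed dict: every key of d, each mapped to 0
  set t0 := d.keys.foldl (fun t k => t.insert k (0 : Int)) PySem.Dict.empty with ht0
  have h0items : t0.items = d.keys.map (fun k => (k, (0 : Int))) := by
    have := PySem.Dict.items_foldl_insert_fresh d.keys (fun k => k) (fun _ => (0 : Int))
      PySem.Dict.empty (by intro a _; simp) (by simpa using hnd)
    simpa using this
  have h0keys : t0.keys = d.keys := by
    simp only [PySem.Dict.keys, h0items, List.map_map]
    simp
  have h0getD : ∀ k ∈ d.keys, t0.getD k 0 = 0 := by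
    intro k hk
    exact PySem.Dict.getD_of_mem_items t0
      (by rw [h0items]; exact List.mem_map.mpr ⟨k, hk, rfl⟩) (h0keys ▸ hnd) 0
  -- B's accumulated dict
  set tt := d.items.foldl (fun t q =>
    (PySem.List.pyRange 0 (PySem.Str.len q.1 + 1)).foldl (fun t i =>
      let p := PySem.Str.slice q.1 none (some i)
      if t.contains p then t.modify p 0 (· + q.2) else t) t) t0 with htt
  have hkeys : tt.keys = d.keys := by rw [htt, outerKeys, h0keys]
  have hgetD : ∀ k ∈ d.keys, tt.getD k 0 = T k := by
    intro k hk
    rw [htt, outerGetD, h0getD k hk,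
      if_pos ((PySem.Dict.contains_iff_mem_keys t0 k).mpr (h0keys ▸ hk))]
    simp [hT]
  have hvals : tt.values = d.keys.map (fun k => tt.getD k 0) := by
    rw [PySem.Dict.values_eq_map_keys tt (hkeys ▸ hnd) 0, hkeys]
  -- both sides are the same filtered list of totals, keyed by d.keys
  have hlists : (d.items.filter (fun p => decide (m_l ≤ T p.1))).map (fun p => T p.1)
      = tt.values.filter (fun t => decide (m_l ≤ t)) := by
    rw [hvals, List.filter_map,
      PySem.Dict.items_eq_map_keys d hnd 0, List.filter_map, List.map_map]
    simp only [Function.comp_def]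
    rw [List.filter_congr (l := d.keys)
      (q := fun k => decide (m_l ≤ tt.getD k 0))
      (by intro k hk; simp [hgetD k hk])]
    exact List.map_congr_left fun k hk => (hgetD k (List.mem_of_mem_filter hk)).symm
  exact congrArg (fun l => PySem.List.sorted l (fun x => x) true) (hsvar.trans hlists)

-- ===== VERDICT (by name: the statement is the Claim_ definition above) =====
theorem filtrer_mappar2_spec : Claim_equal_filtrer_mappar2 := by
  intro ob m_l _
  unfold Spec_filtrer_mappar2
  exact ports_agree ob m_l
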